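-- pv_equiv track=rewrite | github.com/bonshot/TDA_practicando | practica_por_temas/ejercicios_PD.py | maximizar_ganancias_estaciones
-- ===== SOURCE A (Python) =====
-- def maximizar_ganancias_estaciones(facturacion):
--     n = len(facturacion)
--
--     # Inicializar una matriz para almacenar las ganancias acumulativas
--     dp = [0] * n
--
--     # Llenar la matriz bottom-up
--     for i in range(n):
--         # Caso base
--         if i == 0:
--             dp[i] = facturacion[i]
--         elif i == 1:
--             dp[i] = max(facturacion[i], dp[i - 1])
--         elif i == 2:
--             dp[i] = max(facturacion[i] + dp[i - 2], dp[i - 1])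
--         else:
--             dp[i] = max(facturacion[i] + dp[i - 2], facturacion[i] + dp[i - 3], dp[i - 1])
--
--     # Determinar las estaciones seleccionadas
--     estaciones_seleccionadas = []
--     i = n - 1
--     while i >= 0:
--         if i == 0 or dp[i] != dp[i - 1]:
--             estaciones_seleccionadas.append(i)
--             i -= 2
--         else:
--             i -= 1
--
--     estaciones_seleccionadas.reverse()
--     return estaciones_seleccionadas
-- ===== SOURCE B (Python) =====
-- def maximizar_ganancias_estaciones(facturacion):
--     # Forward DP carrying the chosen indices as a shared immutable chain (head = most
--     # recently chosen index); no dp array and no backward reconstruction pass.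
--     if not facturacion:
--         return []
--     pv2, ps2 = 0, None                    # value/solution-chain two positions back
--     pv, ps = facturacion[0], (0, None)    # value/solution-chain one position back
--     for i in range(1, len(facturacion)):
--         inc = facturacion[i] + (pv2 if i >= 2 else 0)
--         if inc > pv:
--             pv2, ps2, pv, ps = pv, ps, inc, (i, ps2)
--         else:
--             pv2, ps2, pv, ps = pv, ps, pv, ps
--     out = []
--     node = ps
--     while node is not None:
--         out.append(node[0])
--         node = node[1]
--     out.reverse()
--     return out
-- ===== Notes on version B (the rewrite author's own statement) =====
-- stated objective: faster
-- what changed: B computes the same max-revenue DP forward while carrying the chosen indices as shared immutable chains (rolling value/solution state), eliminating A's dp array, the redundant dp[i-3] option and the entire backward reconstruction loop.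
import Mathlib
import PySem

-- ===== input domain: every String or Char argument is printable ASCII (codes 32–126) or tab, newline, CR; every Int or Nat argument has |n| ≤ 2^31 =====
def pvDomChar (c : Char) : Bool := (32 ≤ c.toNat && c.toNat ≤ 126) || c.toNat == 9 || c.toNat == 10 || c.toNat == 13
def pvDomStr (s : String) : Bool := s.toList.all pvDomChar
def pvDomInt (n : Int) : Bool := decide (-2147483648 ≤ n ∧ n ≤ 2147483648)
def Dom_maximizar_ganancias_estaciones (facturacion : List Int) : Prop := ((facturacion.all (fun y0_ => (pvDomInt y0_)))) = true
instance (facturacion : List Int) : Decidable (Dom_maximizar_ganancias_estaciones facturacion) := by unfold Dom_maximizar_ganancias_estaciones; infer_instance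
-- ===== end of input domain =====

-- B replaces A's dp array + backward reconstruction by a single forward pass that also
-- carries the chosen-index lists (objective: alternative decomposition; return value only, no mutation).

-- ===== PORT A =====
-- loop body of A's dp-filling 'for i in range(n)' loop
def pvStepA (facturacion : List Int) (dp : List Int) (i : Int) : List Int :=
  if i = 0 then
    PySem.List.pySetD dp i (PySem.List.pyGetD facturacion i 0)
  else if i = 1 then
    PySem.List.pySetD dp i (max (PySem.List.pyGetD facturacion i 0) (PySem.List.pyGetD dp (i-1) 0))
  else if i = 2 then
    PySem.List.pySetD dp i (max (PySem.List.pyGetD facturacion i 0 + PySem.List.pyGetD dp (i-2) 0)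
                                (PySem.List.pyGetD dp (i-1) 0))
  else
    PySem.List.pySetD dp i (max (max (PySem.List.pyGetD facturacion i 0 + PySem.List.pyGetD dp (i-2) 0)
                                     (PySem.List.pyGetD facturacion i 0 + PySem.List.pyGetD dp (i-3) 0))
                                (PySem.List.pyGetD dp (i-1) 0))

-- A's backward 'while i >= 0' reconstruction loop (acc = estaciones_seleccionadas before the final reverse)
def pvReconLoop (dp : List Int) (acc : List Int) (i : Int) : List Int :=
  if h : 0 ≤ i then
    if i = 0 ∨ PySem.List.pyGetD dp i 0 ≠ PySem.List.pyGetD dp (i-1) 0 then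
      pvReconLoop dp (acc ++ [i]) (i - 2)
    else
      pvReconLoop dp acc (i - 1)
  else acc
termination_by (i + 1).toNat
decreasing_by all_goals omega

def maximizar_ganancias_estaciones (facturacion : List Int) : List Int :=
  let n : Int := facturacion.length
  let dp := (PySem.List.pyRange 0 n 1).foldl (pvStepA facturacion) (List.replicate facturacion.length 0)
  (pvReconLoop dp [] (n - 1)).reverse

-- ===== PORT B =====
-- B's solution chains '(i, rest)'/None are modeled as Lean lists 'i :: rest'/[] (exact: same shape, same sharing).
-- loop body of B's forward pass; state = (val two back, chain two back, val one back, chain one back)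
def pvStepB (facturacion : List Int) (st : Int × List Int × Int × List Int) (i : Int) :
    Int × List Int × Int × List Int :=
  match st with
  | (pv2, ps2, pv, ps) =>
    let inc := PySem.List.pyGetD facturacion i 0 + (if 2 ≤ i then pv2 else 0)
    if pv < inc then (pv, ps, inc, i :: ps2) else (pv, ps, pv, ps)

-- B's final 'while node is not None' materialization loop followed by out.reverse()
def pvWalk (out : List Int) (node : List Int) : List Int :=
  match node with
  | [] => out
  | i :: rest => pvWalk (out ++ [i]) rest

def maximizar_ganancias_estaciones_alt (facturacion : List Int) : List Int :=
  if facturacion = [] then []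
  else
    let n : Int := facturacion.length
    let st := (PySem.List.pyRange 1 n 1).foldl (pvStepB facturacion)
      ((0 : Int), ([] : List Int), PySem.List.pyGetD facturacion 0 0, ([0] : List Int))
    (pvWalk [] st.2.2.2).reverse

-- ===== PRECONDITION & SPEC =====
def Spec_maximizar_ganancias_estaciones (facturacion : List Int) (out : List Int) : Prop := out = maximizar_ganancias_estaciones_alt facturacion
instance (facturacion : List Int) (out : List Int) : Decidable (Spec_maximizar_ganancias_estaciones facturacion out) := by unfold Spec_maximizar_ganancias_estaciones; infer_instance

-- ===== CLAIM (what is proved, stated in full; the proofs are below) =====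
def Claim_equal_maximizar_ganancias_estaciones : Prop := ∀ (facturacion : List Int), Dom_maximizar_ganancias_estaciones facturacion → Spec_maximizar_ganancias_estaciones facturacion (maximizar_ganancias_estaciones facturacion)

-- ===== LEMMAS AND PROOFS =====

-- the common mathematical content: value and solution of the DP at index k
def pvVal (f : List Int) : Nat → Int
  | 0 => PySem.List.pyGetD f 0 0
  | 1 => max (PySem.List.pyGetD f 1 0) (pvVal f 0)
  | (k+2) => max (PySem.List.pyGetD f ((k : Int)+2) 0 + pvVal f k) (pvVal f (k+1))

def pvSol (f : List Int) : Nat → List Int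
  | 0 => [0]
  | 1 => if pvVal f 0 < PySem.List.pyGetD f 1 0 then [1] else [0]
  | (k+2) => if pvVal f (k+1) < PySem.List.pyGetD f ((k : Int)+2) 0 + pvVal f k
             then pvSol f k ++ [(k : Int)+2] else pvSol f (k+1)

lemma pvVal_mono (f : List Int) (k : Nat) : pvVal f k ≤ pvVal f (k+1) := by
  match k with
  | 0 => exact le_max_right _ _
  | k+1 => exact le_max_right _ _

lemma pvVal_succ2 (f : List Int) (k : Nat) :
    pvVal f (k+2) = max (PySem.List.pyGetD f ((k:Int)+2) 0 + pvVal f k) (pvVal f (k+1)) := rfl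

lemma pyGetD_set_cast (L : List Int) (k j : Nat) (v : Int) (hk : k < L.length) :
    PySem.List.pyGetD (L.set k v) (j:Int) 0 = if j = k then v else PySem.List.pyGetD L (j:Int) 0 := by
  rcases eq_or_ne j k with h | h
  · subst h; simp [PySem.List.pyGetD_natCast, List.getD_eq_getElem?_getD, hk]
  · rw [PySem.List.pyGetD_natCast, PySem.List.pyGetD_natCast, List.getD_eq_getElem?_getD,
      List.getD_eq_getElem?_getD, List.getElem?_set, if_neg (Ne.symm h), if_neg h]

-- invariant of A's dp-filling loop: after the range [0,k) the first k cells hold pvVal, the rest 0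
lemma pvDp_spec (f : List Int) : ∀ k : Nat, k ≤ f.length →
    (((PySem.List.pyRange 0 (k:Int) 1).foldl (pvStepA f) (List.replicate f.length 0)).length = f.length) ∧
    (∀ j : Nat, j < f.length →
      PySem.List.pyGetD ((PySem.List.pyRange 0 (k:Int) 1).foldl (pvStepA f) (List.replicate f.length 0)) (j:Int) 0
        = if j < k then pvVal f j else 0) := by
  intro k
  induction k with
  | zero =>
    intro _
    rw [show ((0:Nat):Int) = 0 by norm_num, PySem.List.pyRange_one_eq_nil le_rfl]
    refine ⟨by simp, ?_⟩
    intro j hj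
    simp [PySem.List.pyGetD_natCast, List.getD_eq_getElem?_getD, hj]
  | succ k ih =>
    intro hk1
    obtain ⟨hlen, hval⟩ := ih (by omega)
    have hrange : PySem.List.pyRange 0 ((k+1:Nat):Int) 1
        = PySem.List.pyRange 0 (k:Int) 1 ++ [(k:Int)] := by
      push_cast
      exact PySem.List.pyRange_one_succ_right (by positivity)
    rw [hrange, List.foldl_append]
    set L := (PySem.List.pyRange 0 (k:Int) 1).foldl (pvStepA f) (List.replicate f.length 0) with hL
    have hkL : k < L.length := by omega
    have key : ∃ v, pvStepA f L (k:Int) = L.set k v ∧ v = pvVal f k := by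
      match k, hk1, hval with
      | 0, hk1, hval =>
        refine ⟨PySem.List.pyGetD f 0 0, ?_, rfl⟩
        simp [pvStepA]
        rw [PySem.List.pySetD_of_nonneg L _ (by norm_num)]
        norm_num
      | 1, hk1, hval =>
        have h0 : PySem.List.pyGetD L 0 0 = pvVal f 0 := by
          have := hval 0 (by omega); simpa using this
        refine ⟨max (PySem.List.pyGetD f 1 0) (pvVal f 0), ?_, rfl⟩
        simp [pvStepA, h0]
        rw [PySem.List.pySetD_of_nonneg L _ (by norm_num)]
        norm_num
      | 2, hk1, hval =>
        have h0 : PySem.List.pyGetD L 0 0 = pvVal f 0 := by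
          have := hval 0 (by omega); simpa using this
        have h1 : PySem.List.pyGetD L 1 0 = pvVal f 1 := by
          have := hval 1 (by omega); simpa using this
        refine ⟨max (PySem.List.pyGetD f 2 0 + pvVal f 0) (pvVal f 1), ?_, ?_⟩
        · simp [pvStepA, h0, h1]
          rw [PySem.List.pySetD_of_nonneg L _ (by norm_num)]
          rfl
        · show _ = pvVal f (0 + 2)
          rw [pvVal_succ2]
          norm_num
      | (m+3), hk1, hval =>
        have c1 : (((m+3:Nat)):Int) - 1 = ((m+2:Nat):Int) := by push_cast; ring
        have c2 : (((m+3:Nat)):Int) - 2 = ((m+1:Nat):Int) := by push_cast; ring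
        have c3 : (((m+3:Nat)):Int) - 3 = ((m:Nat):Int) := by push_cast; ring
        have h1 : PySem.List.pyGetD L ((((m+3:Nat)):Int) - 1) 0 = pvVal f (m+2) := by
          rw [c1, hval (m+2) (by omega)]; simp
        have h2 : PySem.List.pyGetD L ((((m+3:Nat)):Int) - 2) 0 = pvVal f (m+1) := by
          rw [c2, hval (m+1) (by omega)]; simp
        have h3 : PySem.List.pyGetD L ((((m+3:Nat)):Int) - 3) 0 = pvVal f m := by
          rw [c3, hval m (by omega)]; simp
        have hmono := pvVal_mono f m
        have hne0 : ¬ (((m+3:Nat)):Int) = 0 := by push_cast; omega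
        have hne1 : ¬ (((m+3:Nat)):Int) = 1 := by push_cast; omega
        have hne2 : ¬ (((m+3:Nat)):Int) = 2 := by push_cast; omega
        refine ⟨max (PySem.List.pyGetD f ((m+3:Nat):Int) 0 + pvVal f (m+1)) (pvVal f (m+2)), ?_, ?_⟩
        · rw [pvStepA, if_neg hne0, if_neg hne1, if_neg hne2, h1, h2, h3,
            PySem.List.pySetD_of_nonneg L _ (Int.natCast_nonneg _), Int.toNat_natCast]
          congr 1
          omega
        · show _ = pvVal f ((m+1) + 2)
          conv_rhs => rw [pvVal_succ2]
          rw [show (((m+3:Nat)):Int) = ((m+1:Nat):Int)+2 by push_cast; ring]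
    obtain ⟨v, hstep, hv⟩ := key
    rw [show List.foldl (pvStepA f) L [(k:Int)] = pvStepA f L (k:Int) from rfl, hstep]
    refine ⟨by simp [hlen], ?_⟩
    intro j hj
    rw [pyGetD_set_cast L k j v hkL]
    rcases eq_or_ne j k with h | h
    · subst h; simp [hv]
    · rw [if_neg h, hval j hj]
      by_cases hjk : j < k
      · rw [if_pos hjk, if_pos (by omega)]
      · rw [if_neg hjk, if_neg (by omega)]

lemma pvSol_one (f : List Int) :
    pvSol f 1 = if pvVal f 0 < PySem.List.pyGetD f 1 0 then [1] else [0] := rfl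

lemma pvSol_succ2 (f : List Int) (k : Nat) :
    pvSol f (k+2) = if pvVal f (k+1) < PySem.List.pyGetD f ((k : Int)+2) 0 + pvVal f k
                    then pvSol f k ++ [(k : Int)+2] else pvSol f (k+1) := rfl

-- A's backward reconstruction, run on a dp table holding pvVal, yields pvSol reversed
lemma pvRecon_spec (f dp : List Int)
    (hdp : ∀ j : Nat, j < f.length → PySem.List.pyGetD dp (j:Int) 0 = pvVal f j) :
    ∀ k : Nat, k < f.length → ∀ acc, pvReconLoop dp acc (k:Int) = acc ++ (pvSol f k).reverse := by
  intro k
  induction k using Nat.strong_induction_on with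
  | _ k ih =>
    intro hk acc
    rw [pvReconLoop, dif_pos (Int.natCast_nonneg k)]
    match k, hk, ih with
    | 0, hk, ih =>
      rw [if_pos (Or.inl (by norm_num)), pvReconLoop, dif_neg (by norm_num)]
      norm_num [pvSol]
    | 1, hk, ih =>
      have e1 : PySem.List.pyGetD dp ((1:Nat):Int) 0 = pvVal f 1 := hdp 1 hk
      have e0 : PySem.List.pyGetD dp (((1:Nat):Int) - 1) 0 = pvVal f 0 := by
        rw [show (((1:Nat):Int) - 1) = ((0:Nat):Int) by norm_num]; exact hdp 0 (by omega)
      by_cases hc : pvVal f 0 < PySem.List.pyGetD f 1 0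
      · rw [if_pos (Or.inr (by rw [e1, e0]; show max _ _ ≠ _; omega)),
          pvReconLoop, dif_neg (by norm_num), pvSol_one, if_pos hc]
        norm_num
      · have hmax : pvVal f 1 = pvVal f 0 := by show max _ _ = _; omega
        rw [if_neg (by rw [e1, e0]; exact not_or.mpr ⟨by norm_num, not_not.mpr hmax⟩),
          show (((1:Nat):Int) - 1) = ((0:Nat):Int) by norm_num,
          ih 0 (by omega) (by omega) acc, pvSol_one, if_neg hc]
        rfl
    | (m+2), hk, ih =>
      have e2 : PySem.List.pyGetD dp ((m+2:Nat):Int) 0 = pvVal f (m+2) := hdp (m+2) hk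
      have c1 : (((m+2:Nat)):Int) - 1 = ((m+1:Nat):Int) := by push_cast; ring
      have c2 : (((m+2:Nat)):Int) - 2 = ((m:Nat):Int) := by push_cast; ring
      have e1 : PySem.List.pyGetD dp ((((m+2:Nat)):Int) - 1) 0 = pvVal f (m+1) := by
        rw [c1]; exact hdp (m+1) (by omega)
      have hv2 := pvVal_succ2 f m
      by_cases hc : pvVal f (m+1) < PySem.List.pyGetD f ((m : Int)+2) 0 + pvVal f m
      · rw [if_pos (Or.inr (by rw [e2, e1, hv2]; show max _ _ ≠ _; omega)), c2,
          ih m (by omega) (by omega) (acc ++ [((m+2:Nat):Int)]), pvSol_succ2, if_pos hc]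
        push_cast
        simp
      · have hmax : pvVal f (m+2) = pvVal f (m+1) := by rw [hv2]; omega
        rw [if_neg (by rw [e2, e1]; exact not_or.mpr ⟨by push_cast; omega, not_not.mpr hmax⟩), c1,
          ih (m+1) (by omega) (by omega) acc, pvSol_succ2, if_neg hc]

lemma pvWalk_eq (out node : List Int) : pvWalk out node = out ++ node := by
  induction node generalizing out with
  | nil => simp [pvWalk]
  | cons i rest ih => rw [pvWalk, ih]; simp

-- invariant of B's forward loop: after the range [1,k) the state holds val/sol at k-2 and k-1
lemma pvAlt_spec (f : List Int) : ∀ k : Nat, 1 ≤ k → k ≤ f.length →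
    (PySem.List.pyRange 1 (k:Int) 1).foldl (pvStepB f)
      ((0 : Int), ([] : List Int), PySem.List.pyGetD f 0 0, ([0] : List Int))
    = ((if k = 1 then 0 else pvVal f (k-2)), (if k = 1 then [] else (pvSol f (k-2)).reverse),
       pvVal f (k-1), (pvSol f (k-1)).reverse) := by
  intro k
  induction k with
  | zero => omega
  | succ k ih =>
    intro _ hk1
    rcases Nat.eq_or_lt_of_le (show 1 ≤ k + 1 from by omega) with h1 | h1
    · -- k + 1 = 1 : empty range, initial state
      have hk0 : k = 0 := by omega
      subst hk0
      rw [show ((1:Nat):Int) = 1 by norm_num, PySem.List.pyRange_one_eq_nil le_rfl]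
      simp [pvVal]
      rfl
    · -- k ≥ 1 : peel off the last index k
      have hk : 1 ≤ k := by omega
      have hrange : PySem.List.pyRange 1 ((k+1:Nat):Int) 1
          = PySem.List.pyRange 1 (k:Int) 1 ++ [(k:Int)] := by
        push_cast
        exact PySem.List.pyRange_one_succ_right (by exact_mod_cast hk)
      rw [hrange, List.foldl_append, ih hk (by omega),
        show List.foldl (pvStepB f) _ [(k:Int)] = pvStepB f _ (k:Int) from rfl]
      match k, hk, hk1 with
      | 1, _, hk1 =>
        have hgt : ¬ (2 ≤ (1:Int)) := by norm_num
        rw [pvStepB]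
        simp only [Nat.cast_one, hgt, if_false, add_zero]
        by_cases hc : pvVal f 0 < PySem.List.pyGetD f 1 0
        · rw [if_pos hc]
          have hv1 : pvVal f 1 = PySem.List.pyGetD f 1 0 := by show max _ _ = _; omega
          simp [pvSol_one, hc, hv1]
        · rw [if_neg hc]
          have hv1 : pvVal f 1 = pvVal f 0 := by show max _ _ = _; omega
          simp [pvSol, hc, hv1]
      | (m+2), _, hk1 =>
        have hgt : (2 ≤ ((m+2:Nat):Int)) := by push_cast; omega
        have hne1 : ¬ (m + 2 = 1) := by omega
        rw [pvStepB]
        simp only [if_neg hne1, if_pos hgt]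
        have hfc : PySem.List.pyGetD f ((m+2:Nat):Int) 0 = PySem.List.pyGetD f ((m:Int)+2) 0 := by
          rw [show ((m+2:Nat):Int) = ((m:Int)+2) from by push_cast; ring]
        have hs2 : m + 2 - 2 = m := by omega
        have hs1 : m + 2 - 1 = m + 1 := by omega
        rw [hs2, hs1, hfc]
        by_cases hc : pvVal f (m+1) < PySem.List.pyGetD f ((m:Int)+2) 0 + pvVal f m
        · rw [if_pos hc]
          have hv : pvVal f (m+2) = PySem.List.pyGetD f ((m:Int)+2) 0 + pvVal f m := by
            rw [pvVal_succ2]; omega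
          have hns : m + 2 + 1 - 2 = m + 1 := by omega
          simp only [hns, show m + 2 + 1 - 1 = m + 2 from by omega, if_neg (show ¬ (m+2+1 = 1) from by omega)]
          rw [hv, pvSol_succ2, if_pos hc]
          push_cast
          simp
        · rw [if_neg hc]
          have hv : pvVal f (m+2) = pvVal f (m+1) := by rw [pvVal_succ2]; omega
          simp only [show m + 2 + 1 - 2 = m + 1 from by omega, show m + 2 + 1 - 1 = m + 2 from by omega,
            if_neg (show ¬ (m+2+1 = 1) from by omega)]
          rw [hv, pvSol_succ2, if_neg hc]

theorem maximizar_ganancias_estaciones_spec : Claim_equal_maximizar_ganancias_estaciones := by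
  intro f _
  unfold Spec_maximizar_ganancias_estaciones
  rcases eq_or_ne f [] with hnil | hnil
  · subst hnil
    show (pvReconLoop _ [] _).reverse = _
    rw [pvReconLoop, dif_neg (by norm_num)]
    rfl
  · have hlen : 1 ≤ f.length := by
      cases f with
      | nil => simp at hnil
      | cons a l => simp
    -- evaluate A
    obtain ⟨hdplen, hdpval⟩ := pvDp_spec f f.length le_rfl
    have hdp : ∀ j : Nat, j < f.length →
        PySem.List.pyGetD ((PySem.List.pyRange 0 (f.length:Int) 1).foldl (pvStepA f)
          (List.replicate f.length 0)) (j:Int) 0 = pvVal f j := by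
      intro j hj
      rw [hdpval j hj, if_pos hj]
    have hA : maximizar_ganancias_estaciones f = pvSol f (f.length - 1) := by
      show (pvReconLoop ((PySem.List.pyRange 0 (f.length:Int) 1).foldl (pvStepA f)
        (List.replicate f.length 0)) [] ((f.length:Int) - 1)).reverse = _
      rw [show ((f.length:Int) - 1) = ((f.length - 1 : Nat) : Int) by omega,
        pvRecon_spec f _ hdp (f.length - 1) (by omega) []]
      simp
    -- evaluate B
    have hB : maximizar_ganancias_estaciones_alt f = pvSol f (f.length - 1) := by
      unfold maximizar_ganancias_estaciones_alt
      rw [if_neg hnil]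
      show (pvWalk [] (((PySem.List.pyRange 1 (f.length:Int) 1).foldl (pvStepB f)
        ((0 : Int), ([] : List Int), PySem.List.pyGetD f 0 0, ([0] : List Int)))).2.2.2).reverse = _
      rw [pvAlt_spec f f.length hlen le_rfl]
      show (pvWalk [] ((pvSol f (f.length - 1)).reverse)).reverse = _
      rw [pvWalk_eq]
      simp
    rw [hA, hB]
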